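-- pv_equiv track=rewrite | github.com/g4nd4lf/AdventOfCode | 2021/reto_day15.py | singleSmall
-- ===== SOURCE A (Python) =====
-- def singleSmall(vertex,path=[]):
--     if vertex.isupper():
--         return True
--     elif (vertex=='start' or vertex=='end'):
--         return False
--     else:
--         minusc=[x for x in path if x.islower()]
--         return not (len(minusc))!=len(set(minusc))
-- ===== SOURCE B (Python) =====
-- def singleSmall(vertex, path=[]):
--     if vertex.isupper():
--         return True
--     if vertex == 'start' or vertex == 'end':
--         return False
--     minusc = sorted(x for x in path if x.islower())
--     for i in range(1, len(minusc)):
--         if minusc[i - 1] == minusc[i]: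
--             return False
--     return True
-- ===== Notes on version B (the rewrite author's own statement) =====
-- stated objective: alternative
-- what changed: Replaces A's build-a-set-and-compare-lengths duplicate test on the lowercase path elements with sort-then-adjacent-scan with early exit at the first equal neighbouring pair.
import Mathlib
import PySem

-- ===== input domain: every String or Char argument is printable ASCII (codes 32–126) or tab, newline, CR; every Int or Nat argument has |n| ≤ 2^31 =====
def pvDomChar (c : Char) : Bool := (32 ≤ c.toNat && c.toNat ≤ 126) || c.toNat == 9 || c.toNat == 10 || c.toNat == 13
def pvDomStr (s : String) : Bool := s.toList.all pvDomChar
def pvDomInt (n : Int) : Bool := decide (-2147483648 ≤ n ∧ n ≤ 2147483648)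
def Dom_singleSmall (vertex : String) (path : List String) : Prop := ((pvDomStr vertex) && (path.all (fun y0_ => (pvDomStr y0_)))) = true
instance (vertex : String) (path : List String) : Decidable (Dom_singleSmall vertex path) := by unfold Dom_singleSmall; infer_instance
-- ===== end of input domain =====

-- B replaces A's set-length duplicate test on the lowercase path elements by a
-- sort-then-adjacent-scan with early exit; same value everywhere (alternative algorithm).

-- ===== PORT A =====
-- str.isupper(): at least one cased character and no lowercase one (exact on the ASCII domain,
-- where the cased characters are exactly the letters).
def pyStrIsupper (s : String) : Bool :=
  s.toList.any PySem.Chars.isalpha && s.toList.all (fun c => !PySem.Chars.islower c)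

-- str.islower(): at least one cased character and no uppercase one (exact on the ASCII domain).
def pyStrIslower (s : String) : Bool :=
  s.toList.any PySem.Chars.isalpha && s.toList.all (fun c => !PySem.Chars.isupper c)

def singleSmall (vertex : String) (path : List String) : Bool :=
  if pyStrIsupper vertex then true
  else if vertex == "start" || vertex == "end" then false
  else
    let minusc := path.filter (fun x => pyStrIslower x)
    -- not (len(minusc) != len(set(minusc)))
    decide (¬ ((minusc.length : Int) ≠ ((PySem.Set.ofList minusc).length : Int)))

-- ===== PORT B =====
-- the for-loop of Source B: scan adjacent pairs, return False at the first equal pair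
def adjScan : List String → Bool
  | [] => true
  | [_] => true
  | a :: b :: t => if a == b then false else adjScan (b :: t)

def singleSmall_alt (vertex : String) (path : List String) : Bool :=
  if pyStrIsupper vertex then true
  else if vertex == "start" || vertex == "end" then false
  else
    adjScan (PySem.List.sorted (path.filter (fun x => pyStrIslower x)) (fun x => x) false)

-- ===== PRECONDITION & SPEC =====
def Spec_singleSmall (vertex : String) (path : List String) (out : Bool) : Prop := out = singleSmall_alt vertex path
instance (vertex : String) (path : List String) (out : Bool) : Decidable (Spec_singleSmall vertex path out) := by unfold Spec_singleSmall; infer_instance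

-- ===== CLAIM (what is proved, stated in full; the proofs are below) =====
def Claim_equal_singleSmall : Prop := ∀ (vertex : String) (path : List String), Dom_singleSmall vertex path → Spec_singleSmall vertex path (singleSmall vertex path)

-- ===== LEMMAS AND PROOFS =====

-- set(l) has the size of l exactly when l has no duplicates
theorem ofList_length_eq_iff (l : List String) :
    (PySem.Set.ofList l).length = l.length ↔ l.Nodup := by
  constructor
  · intro h
    have hsub : PySem.Set.ofList l ⊆ l := fun a ha => (PySem.Set.mem_ofList l a).1 ha
    have hsp : (PySem.Set.ofList l).Subperm l :=
      List.subperm_of_subset (PySem.Set.nodup_ofList l) hsub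
    have hperm : (PySem.Set.ofList l).Perm l := hsp.perm_of_length_le (le_of_eq h.symm)
    exact hperm.nodup_iff.mp (PySem.Set.nodup_ofList l)
  · intro h
    have hperm : (PySem.Set.ofList l).Perm l := by
      apply (List.perm_ext_iff_of_nodup (PySem.Set.nodup_ofList l) h).2
      intro a; exact PySem.Set.mem_ofList l a
    exact hperm.length_eq

-- on a ≤-sorted list the adjacent scan detects exactly the duplicates
theorem adjScan_eq_true_iff (l : List String) (hp : l.Pairwise (· ≤ ·)) :
    adjScan l = true ↔ l.Nodup := by
  induction l with
  | nil => simp [adjScan]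
  | cons a t ih =>
    cases t with
    | nil => simp [adjScan]
    | cons b u =>
      rw [List.pairwise_cons] at hp
      obtain ⟨hab, hbu⟩ := hp
      by_cases h : a = b
      · subst h
        simp [adjScan]
      · have hne : (a == b) = false := by simp [h]
        have hnotmem : a ∉ b :: u := by
          intro hmem
          rcases List.mem_cons.1 hmem with h1 | h2
          · exact h h1
          · have hba : b ≤ a := (List.pairwise_cons.1 hbu).1 a h2
            exact h (le_antisymm (hab b (by simp)) hba)
        rw [show adjScan (a :: b :: u) = adjScan (b :: u) by simp [adjScan, hne]]
        rw [ih hbu]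
        simp [List.nodup_cons, hnotmem]

theorem singleSmall_eq (vertex : String) (path : List String) :
    singleSmall vertex path = singleSmall_alt vertex path := by
  unfold singleSmall singleSmall_alt
  by_cases h1 : pyStrIsupper vertex
  · simp [h1]
  · by_cases h2 : (vertex == "start" || vertex == "end") = true
    · simp [h1, h2]
    · simp only [h1, h2, if_false, Bool.false_eq_true]
      set minusc := path.filter (fun x => pyStrIslower x) with hm
      set s := PySem.List.sorted minusc (fun x => x) false with hs
      have hperm : s.Perm minusc := PySem.List.sorted_perm minusc (fun x => x) false
      have hpw : s.Pairwise (· ≤ ·) := PySem.List.sorted_pairwise minusc (fun x => x)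
      have hadj : adjScan s = true ↔ minusc.Nodup := by
        rw [adjScan_eq_true_iff s hpw]; exact hperm.nodup_iff
      by_cases hnd : minusc.Nodup
      · have hlen : (PySem.Set.ofList minusc).length = minusc.length :=
          (ofList_length_eq_iff minusc).2 hnd
        have : adjScan s = true := hadj.2 hnd
        simp [this, hlen]
      · have hlen : (PySem.Set.ofList minusc).length ≠ minusc.length := by
          intro h; exact hnd ((ofList_length_eq_iff minusc).1 h)
        have hadjf : adjScan s = false := by
          cases hb : adjScan s
          · rfl
          · exact absurd (hadj.1 hb) hnd
        have hlen' : (minusc.length : Int) ≠ ((PySem.Set.ofList minusc).length : Int) := by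
          intro h; exact hlen (by exact_mod_cast h.symm)
        simp [hadjf, hlen']

-- ===== VERDICT (by name: the statement is the Claim_ definition above) =====
theorem singleSmall_spec : Claim_equal_singleSmall := by
  intro vertex path _
  unfold Spec_singleSmall
  exact singleSmall_eq vertex path
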